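-- pv_equiv track=rewrite | github.com/smartscanapp/smartscan-lib | smartscan/cluster/cluster_analysis.py | count_predicted_labels
-- ===== SOURCE A (Python) =====
-- def count_predicted_labels(assignments: dict[str, str], labels: list[str]) -> dict[str, int]:
--     counts: dict[str, dict[str, int]] = {}
--
--     for item_id, cluster_id in assignments.items():
--         for label in labels:
--             if item_id.startswith(label):
--                 counts.setdefault(label, {})
--                 counts[label][cluster_id] = counts[label].get(cluster_id, 0) + 1
--                 break
--
--     return {label: max(cluster_counts.values()) for label, cluster_counts in counts.items()}
-- ===== SOURCE B (Python) =====
-- def count_predicted_labels(assignments: dict[str, str], labels: list[str]) -> dict[str, int]: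
--     # Map each distinct label string to its first position in `labels`.
--     first_idx: dict[str, int] = {}
--     for i, lab in enumerate(labels):
--         if lab not in first_idx:
--             first_idx[lab] = i
--     maxes: dict[str, int] = {}
--     pair_counts: dict[tuple[str, str], int] = {}
--     for item_id, cluster_id in assignments.items():
--         # Instead of scanning the label list, look up every prefix of the
--         # item id in the label index and keep the earliest-positioned hit.
--         best = None
--         for k in range(len(item_id) + 1):
--             p = item_id[:k]
--             i = first_idx.get(p)
--             if i is not None and (best is None or i < best[0]):
--                 best = (i, p)
--         if best is not None:
--             lab = best[1]
--             c = pair_counts.get((lab, cluster_id), 0) + 1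
--             pair_counts[(lab, cluster_id)] = c
--             if c > maxes.get(lab, 0):
--                 maxes[lab] = c
--     return maxes
-- ===== Notes on version B (the rewrite author's own statement) =====
-- stated objective: faster
-- what changed: B picks each item's label by looking up the item's prefixes in a dict keyed by label (earliest label position wins) instead of scanning the whole label list per item, and replaces A's nested per-label cluster dicts plus a final max() pass by one flat (label, cluster) counter with a running maximum.
import Mathlib
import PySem

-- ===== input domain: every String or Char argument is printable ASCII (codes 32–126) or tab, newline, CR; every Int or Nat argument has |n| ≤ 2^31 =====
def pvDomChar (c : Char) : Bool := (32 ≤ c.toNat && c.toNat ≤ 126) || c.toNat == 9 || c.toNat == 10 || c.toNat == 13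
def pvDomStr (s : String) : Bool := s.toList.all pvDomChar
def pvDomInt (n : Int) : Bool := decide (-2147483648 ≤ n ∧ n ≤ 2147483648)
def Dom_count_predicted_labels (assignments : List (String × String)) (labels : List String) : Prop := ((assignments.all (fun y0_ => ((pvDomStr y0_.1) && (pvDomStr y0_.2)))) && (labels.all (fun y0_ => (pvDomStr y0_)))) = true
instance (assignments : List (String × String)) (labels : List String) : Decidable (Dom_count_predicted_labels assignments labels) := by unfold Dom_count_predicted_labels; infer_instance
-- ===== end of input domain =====

-- B replaces A's per-item scan over the whole label list by a dict lookup of the item's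
-- prefixes keyed by label (earliest label position wins) and replaces A's nested
-- per-label cluster dicts + final max() by one flat (label, cluster) counter with a
-- running maximum; equivalence of the return values is proved below.

-- ===== PORT A =====
-- inner loop 'for label in labels: if item_id.startswith(label): …; break'
def pvInnerA (item cluster : String)
    (counts : PySem.Dict String (PySem.Dict String Int)) :
    List String → PySem.Dict String (PySem.Dict String Int)
  | [] => counts
  | label :: rest =>
    if PySem.Str.startswith item label then
      let c1 := counts.setdefault label PySem.Dict.empty
      let inner := c1.getD label PySem.Dict.empty
      c1.insert label (inner.insert cluster (inner.getD cluster 0 + 1))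
    else pvInnerA item cluster counts rest

def count_predicted_labels (assignments : List (String × String)) (labels : List String) :
    List (String × Int) :=
  let counts := assignments.foldl (fun c p => pvInnerA p.1 p.2 c labels) PySem.Dict.empty
  -- final dict comprehension; every inner dict stored in counts is nonempty by
  -- construction, so Python's max() never raises and max? is always some here
  counts.items.map (fun p => (p.1, (PySem.List.max? p.2.values (fun x => x)).getD 0))

-- ===== PORT B =====
-- first_idx: each distinct label string mapped to its first position in `labels`
def pvFirstIdx (labels : List String) : PySem.Dict String Int :=
  labels.zipIdx.foldl
    (fun d li => if d.contains li.1 then d else d.insert li.1 (li.2 : Int))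
    PySem.Dict.empty

-- 'for k in range(len(item_id)+1)' is k = 0, …, len(item_id); item_id[:k] with 0 ≤ k
-- the body of the 'for k in range(len(item_id)+1)' loop of Source B
def pvBStep (fi : PySem.Dict String Int) (item : String)
    (best : Option (Int × String)) (k : Nat) : Option (Int × String) :=
  let p := PySem.Str.slice item none (some (k : Int))
  match fi.get? p with
  | none => best
  | some i =>
    match best with
    | none => some (i, p)
    | some b => if i < b.1 then some (i, p) else best

def pvBest (fi : PySem.Dict String Int) (item : String) : Option (Int × String) :=
  (List.range (item.toList.length + 1)).foldl (pvBStep fi item) none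

def pvStepB (fi : PySem.Dict String Int)
    (st : PySem.Dict String Int × PySem.Dict (String × String) Int)
    (a : String × String) :
    PySem.Dict String Int × PySem.Dict (String × String) Int :=
  match pvBest fi a.1 with
  | none => st
  | some b =>
    let lab := b.2
    let c := st.2.getD (lab, a.2) 0 + 1
    (if c > st.1.getD lab 0 then st.1.insert lab c else st.1,
     st.2.insert (lab, a.2) c)

def count_predicted_labels_alt (assignments : List (String × String)) (labels : List String) :
    List (String × Int) :=
  (assignments.foldl (pvStepB (pvFirstIdx labels))
      (PySem.Dict.empty, PySem.Dict.empty)).1.items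

-- ===== PRECONDITION & SPEC =====
def Spec_count_predicted_labels (assignments : List (String × String)) (labels : List String) (out : List (String × Int)) : Prop := out = count_predicted_labels_alt assignments labels
instance (assignments : List (String × String)) (labels : List String) (out : List (String × Int)) : Decidable (Spec_count_predicted_labels assignments labels out) := by unfold Spec_count_predicted_labels; infer_instance

-- ===== CLAIM (what is proved, stated in full; the proofs are below) =====
def Claim_equal_count_predicted_labels : Prop := ∀ (assignments : List (String × String)) (labels : List String), Dom_count_predicted_labels assignments labels → Spec_count_predicted_labels assignments labels (count_predicted_labels assignments labels)

-- ===== LEMMAS AND PROOFS =====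

-- the label A's inner loop picks for one item: the first label that is a prefix of it
def pvChoose (labels : List String) (item : String) : Option String :=
  labels.find? (fun l => PySem.Str.startswith item l)

-- the per-item decisions both programs act on: (chosen label, cluster) for each item
def pvDs (assignments : List (String × String)) (labels : List String) :
    List (String × String) :=
  assignments.filterMap (fun a => (pvChoose labels a.1).map (fun l => (l, a.2)))

def pvClustersOf (ds : List (String × String)) (l : String) : List String :=
  (ds.filter (fun d => d.1 == l)).map (fun d => d.2)

-- A's fold step, expressed on one decision
def pvStepA (counts : PySem.Dict String (PySem.Dict String Int)) (d : String × String) :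
    PySem.Dict String (PySem.Dict String Int) :=
  let c1 := counts.setdefault d.1 PySem.Dict.empty
  let inner := c1.getD d.1 PySem.Dict.empty
  c1.insert d.1 (inner.insert d.2 (inner.getD d.2 0 + 1))

-- B's fold step, expressed on one decision
def pvStepD (st : PySem.Dict String Int × PySem.Dict (String × String) Int)
    (d : String × String) :
    PySem.Dict String Int × PySem.Dict (String × String) Int :=
  let c := st.2.getD d 0 + 1
  (if c > st.1.getD d.1 0 then st.1.insert d.1 c else st.1, st.2.insert d c)

-- the value A's comprehension produces for one label, as a function of its cluster list
def pvMx (cs : List String) : Int :=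
  (PySem.List.max? (PySem.Dict.counter cs).values (fun x => x)).getD 0



lemma pvBStep_fold_none (fi : PySem.Dict String Int) (item : String) (ks : List Nat)
    (h : ∀ k ∈ ks, fi.get? (PySem.Str.slice item none (some (k : Int))) = none) :
    ks.foldl (pvBStep fi item) none = none := by
  induction ks with
  | nil => rfl
  | cons k t ih =>
    have hk := h k (by simp)
    simp only [List.foldl_cons, pvBStep, hk]
    exact ih (fun k hk => h k (by simp [hk]))

lemma pvBStep_fold_mem (fi : PySem.Dict String Int) (item : String) (ks : List Nat)
    (b : Int × String) :
    ∀ acc : Option (Int × String), ks.foldl (pvBStep fi item) acc = some b →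
      acc = some b ∨ ∃ k ∈ ks,
        fi.get? (PySem.Str.slice item none (some (k : Int))) = some b.1 ∧
          b.2 = PySem.Str.slice item none (some (k : Int)) := by
  induction ks with
  | nil => intro acc h; exact Or.inl h
  | cons k t ih =>
    intro acc h
    simp only [List.foldl_cons] at h
    rcases hg : fi.get? (PySem.Str.slice item none (some (k : Int))) with _ | i
    · have hs : pvBStep fi item acc k = acc := by simp [pvBStep, hg]
      rw [hs] at h
      rcases ih _ h with h' | ⟨k', hk', h1, h2⟩
      · exact Or.inl h'
      · exact Or.inr ⟨k', by simp [hk'], h1, h2⟩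
    · have hs : pvBStep fi item acc k = acc ∨
          pvBStep fi item acc k = some (i, PySem.Str.slice item none (some (k : Int))) := by
        rcases acc with _ | c
        · exact Or.inr (by simp [pvBStep, hg])
        · by_cases hlt : i < c.1
          · exact Or.inr (by simp [pvBStep, hg, hlt])
          · exact Or.inl (by simp [pvBStep, hg, hlt])
      rcases hs with hs | hs
      · rw [hs] at h
        rcases ih _ h with h' | ⟨k', hk', h1, h2⟩
        · exact Or.inl h'
        · exact Or.inr ⟨k', by simp [hk'], h1, h2⟩
      · rw [hs] at h
        rcases ih _ h with h' | ⟨k', hk', h1, h2⟩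
        · cases h'
          exact Or.inr ⟨k, by simp, hg, rfl⟩
        · exact Or.inr ⟨k', by simp [hk'], h1, h2⟩

lemma pvBStep_fold_mono (fi : PySem.Dict String Int) (item : String) (ks : List Nat) :
    ∀ b : Int × String,
      ∃ j q, ks.foldl (pvBStep fi item) (some b) = some (j, q) ∧ j ≤ b.1 := by
  induction ks with
  | nil => intro b; exact ⟨b.1, b.2, by simp, le_refl _⟩
  | cons k t ih =>
    intro b
    simp only [List.foldl_cons]
    have hs : ∃ b' : Int × String, pvBStep fi item (some b) k = some b' ∧ b'.1 ≤ b.1 := by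
      rcases hg : fi.get? (PySem.Str.slice item none (some (k : Int))) with _ | i
      · exact ⟨b, by simp [pvBStep, hg], le_refl _⟩
      · by_cases hlt : i < b.1
        · exact ⟨(i, PySem.Str.slice item none (some (k : Int))), by simp [pvBStep, hg, hlt], le_of_lt hlt⟩
        · exact ⟨b, by simp [pvBStep, hg, hlt], le_refl _⟩
    obtain ⟨b', hb', hle⟩ := hs
    rw [hb']
    obtain ⟨j, q, hf, hj⟩ := ih b'
    exact ⟨j, q, hf, le_trans hj hle⟩

lemma pvBStep_fold_min (fi : PySem.Dict String Int) (item : String) (ks : List Nat)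
    (k : Nat) (i : Int) (hk : k ∈ ks)
    (hg : fi.get? (PySem.Str.slice item none (some (k : Int))) = some i) :
    ∀ acc : Option (Int × String),
      ∃ j q, ks.foldl (pvBStep fi item) acc = some (j, q) ∧ j ≤ i := by
  induction ks with
  | nil => cases hk
  | cons k' t ih =>
    intro acc
    simp only [List.foldl_cons]
    rcases List.mem_cons.mp hk with rfl | hmem
    · have hs : ∃ b : Int × String, pvBStep fi item acc k = some b ∧ b.1 ≤ i := by
        rcases acc with _ | c
        · exact ⟨(i, PySem.Str.slice item none (some (k : Int))), by simp [pvBStep, hg], le_refl _⟩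
        · by_cases hlt : i < c.1
          · exact ⟨(i, PySem.Str.slice item none (some (k : Int))), by simp [pvBStep, hg, hlt], le_refl _⟩
          · exact ⟨c, by simp [pvBStep, hg, hlt], not_lt.mp hlt⟩
      obtain ⟨b, hb, hbi⟩ := hs
      rw [hb]
      obtain ⟨j, q, hf, hj⟩ := pvBStep_fold_mono fi item t b
      exact ⟨j, q, hf, le_trans hj hbi⟩
    · exact ih hmem _

lemma pvFI_aux (s : String) : ∀ (ls : List String) (b : Nat) (d : PySem.Dict String Int),
    ((List.zipIdx ls b).foldl
        (fun d li => if d.contains li.1 then d else d.insert li.1 (li.2 : Int)) d).get? s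
      = (d.get? s).or ((List.idxOf? s ls).map (fun n => ((n + b : Nat) : Int))) := by
  intro ls
  induction ls with
  | nil => intro b d; simp
  | cons l t ih =>
    intro b d
    simp only [List.zipIdx_cons, List.foldl_cons]
    by_cases hls : l = s
    · subst hls
      by_cases hc : d.contains l
      · rw [if_pos hc, ih]
        obtain ⟨v, hv⟩ : ∃ v, d.get? l = some v := by
          apply Option.isSome_iff_exists.mp
          rw [← PySem.Dict.contains_eq_isSome_get?]
          exact hc
        simp [hv, List.idxOf?_cons]
      · rw [if_neg hc, ih]
        have hg : d.get? l = none := by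
          rw [PySem.Dict.get?_eq_none_iff_contains]
          simp [hc]
        simp [hg, PySem.Dict.get?_insert_self, List.idxOf?_cons]
    · have hne : s ≠ l := fun h => hls h.symm
      have hstep : (if d.contains l then d else d.insert l ((b : Nat) : Int)).get? s
          = d.get? s := by
        by_cases hc : d.contains l
        · rw [if_pos hc]
        · rw [if_neg hc]
          exact PySem.Dict.get?_insert_of_ne d _ hne
      rw [ih, hstep, List.idxOf?_cons]
      have hbe : (l == s) = false := by simp [hls]
      simp only [hbe, Bool.false_eq_true, if_false, Option.map_map]
      rcases List.idxOf? s t with _ | n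
      · simp
      · have hnb : (↑n + (↑b + 1) : Int) = ↑n + 1 + ↑b := by omega
        simp [Function.comp, hnb]

lemma pvInnerA_char (item cluster : String) (counts : PySem.Dict String (PySem.Dict String Int))
    (labels : List String) :
    pvInnerA item cluster counts labels =
      match pvChoose labels item with
      | none => counts
      | some l => pvStepA counts (l, cluster) := by
  induction labels with
  | nil => rfl
  | cons a t ih =>
    by_cases h : PySem.Str.startswith item a
    · rw [pvInnerA, if_pos h, pvChoose, List.find?_cons_of_pos h]
      rfl
    · rw [pvInnerA, if_neg h, ih, pvChoose, pvChoose, List.find?_cons_of_neg h]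

lemma pvFoldA_eq (labels : List String) :
    ∀ (assignments : List (String × String)) (init : PySem.Dict String (PySem.Dict String Int)),
    assignments.foldl (fun c p => pvInnerA p.1 p.2 c labels) init =
      (pvDs assignments labels).foldl pvStepA init := by
  intro assignments
  induction assignments with
  | nil => intro init; rfl
  | cons a t ih =>
    intro init
    simp only [List.foldl_cons, pvDs, List.filterMap_cons]
    rcases h : pvChoose labels a.1 with _ | l
    · simp only [Option.map_none]
      rw [pvInnerA_char, h]
      exact ih init
    · simp only [Option.map_some, List.foldl_cons]
      rw [pvInnerA_char, h]
      exact ih _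

lemma pvFirstIdx_get? (labels : List String) (s : String) :
    (pvFirstIdx labels).get? s = (List.idxOf? s labels).map (fun n => (n : Int)) := by
  rw [pvFirstIdx, pvFI_aux s labels 0 PySem.Dict.empty]
  simp only [PySem.Dict.get?_empty, Option.none_or]
  cases List.idxOf? s labels <;> simp

lemma pvSlice_toList (s : String) (k : Nat) :
    (PySem.Str.slice s none (some (k : Int))).toList = s.toList.take k := by
  simp [PySem.Str.slice]

lemma pvSlice_startswith (item : String) (k : Nat) :
    PySem.Str.startswith item (PySem.Str.slice item none (some (k : Int))) = true := by
  rw [PySem.Str.startswith_eq]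
  apply (PySem.Chars.startswith_iff _ _).mpr
  rw [pvSlice_toList]
  exact List.take_prefix _ _

-- find? returns the FIRST match: any other matching element sits at a later first index
lemma pvFind_first (q : String → Bool) :
    ∀ (ls : List String) (l : String), ls.find? q = some l →
      ∀ (i : Nat) (p : String), List.idxOf? p ls = some i → q p = true →
        ∃ j, List.idxOf? l ls = some j ∧ j ≤ i := by
  intro ls
  induction ls with
  | nil => intro l h; cases h
  | cons a t ih =>
    intro l hf i p hidx hq
    by_cases ha : q a
    · rw [List.find?_cons_of_pos ha] at hf
      cases hf
      exact ⟨0, by simp [List.idxOf?_cons], Nat.zero_le _⟩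
    · rw [List.find?_cons_of_neg ha] at hf
      have hpa : (a == p) = false := by
        rcases eq_or_ne a p with rfl | hne
        · rw [hq] at ha; exact absurd rfl ha
        · simp [hne]
      rw [List.idxOf?_cons, hpa] at hidx
      simp only [Bool.false_eq_true, if_false] at hidx
      rcases hi' : List.idxOf? p t with _ | i'
      · rw [hi'] at hidx; cases hidx
      · rw [hi'] at hidx
        simp only [Option.map_some] at hidx
        obtain ⟨j, hj, hle⟩ := ih l hf i' p hi' hq
        have hla : (a == l) = false := by
          have hql : q l = true := List.find?_some hf
          rcases eq_or_ne a l with rfl | hne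
          · rw [hql] at ha; exact absurd rfl ha
          · simp [hne]
        refine ⟨j + 1, ?_, ?_⟩
        · rw [List.idxOf?_cons, hla]
          simp [hj]
        · cases hidx
          omega

lemma pvBest_none (labels : List String) (item : String)
    (h : pvChoose labels item = none) :
    pvBest (pvFirstIdx labels) item = none := by
  rw [pvBest]
  apply pvBStep_fold_none
  intro k _
  rcases hg : (pvFirstIdx labels).get? (PySem.Str.slice item none (some (k : Int))) with _ | i
  · rfl
  · exfalso
    rw [pvFirstIdx_get?] at hg
    rcases hio : List.idxOf? (PySem.Str.slice item none (some (k : Int))) labels with _ | n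
    · rw [hio] at hg; cases hg
    · have hmem : PySem.Str.slice item none (some (k : Int)) ∈ labels := by
        by_contra hnm
        rw [List.idxOf?_eq_none_iff.mpr hnm] at hio
        cases hio
      have hsw := pvSlice_startswith item k
      have := List.find?_eq_none.mp h _ hmem
      rw [hsw] at this
      exact this rfl

lemma pvBest_some (labels : List String) (item : String) (l : String)
    (h : pvChoose labels item = some l) :
    ∃ j : Nat, List.idxOf? l labels = some j ∧
      pvBest (pvFirstIdx labels) item = some ((j : Int), l) := by
  have hql : PySem.Str.startswith item l = true := List.find?_some h
  have hlm : l ∈ labels := List.mem_of_find?_eq_some h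
  rcases hio : List.idxOf? l labels with _ | j
  · exact absurd (List.idxOf?_eq_none_iff.mp hio) (by simp [hlm])
  refine ⟨j, rfl, ?_⟩
  have hpre : l.toList <+: item.toList := by
    apply (PySem.Chars.startswith_iff _ _).mp
    rw [← PySem.Str.startswith_eq]
    exact hql
  have hsl : PySem.Str.slice item none (some ((l.toList.length : Nat) : Int)) = l := by
    apply String.toList_inj.mp
    rw [pvSlice_toList]
    exact (List.prefix_iff_eq_take.mp hpre).symm
  have hcand : (pvFirstIdx labels).get?
      (PySem.Str.slice item none (some ((l.toList.length : Nat) : Int))) = some (j : Int) := by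
    rw [hsl, pvFirstIdx_get?, hio]
    rfl
  have hkmem : l.toList.length ∈ List.range (item.toList.length + 1) := by
    have := hpre.length_le
    simp only [List.mem_range]
    omega
  obtain ⟨j', q, hf, hle⟩ :=
    pvBStep_fold_min (pvFirstIdx labels) item _ l.toList.length _ hkmem hcand none
  rw [pvBest, hf]
  rcases pvBStep_fold_mem (pvFirstIdx labels) item _ (j', q) none hf with h0 | ⟨k, _, hg0, hq0⟩
  · cases h0
  replace hg0 : (pvFirstIdx labels).get?
      (PySem.Str.slice item none (some (k : Int))) = some j' := hg0
  replace hq0 : q = PySem.Str.slice item none (some (k : Int)) := hq0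
  rw [← hq0] at hg0
  rcases hio2 : List.idxOf? q labels with _ | j2
  · rw [pvFirstIdx_get?, hio2] at hg0; cases hg0
  rw [pvFirstIdx_get?, hio2] at hg0
  have hgj : (j2 : Int) = j' := by simpa using hg0
  have hqsw : PySem.Str.startswith item q = true := by
    rw [hq0]; exact pvSlice_startswith item k
  obtain ⟨j3, hj3, hle2⟩ := pvFind_first _ labels l h j2 q hio2 hqsw
  rw [hio] at hj3
  have hj3j : j = j3 := Option.some.inj hj3
  have hj2j : j2 = j := by omega
  have hq_eq : q = l := by
    obtain ⟨hlt, hget, -⟩ := List.idxOf?_eq_some_iff.mp hio2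
    obtain ⟨hlt2, hget2, -⟩ := List.idxOf?_eq_some_iff.mp hio
    subst hj2j
    rw [← hget, ← hget2]
  have hj'j : j' = (j : Int) := by omega
  rw [hq_eq, hj'j]

lemma pvFoldB_eq (labels : List String) :
    ∀ (assignments : List (String × String))
      (st : PySem.Dict String Int × PySem.Dict (String × String) Int),
    assignments.foldl (pvStepB (pvFirstIdx labels)) st =
      (pvDs assignments labels).foldl pvStepD st := by
  intro assignments
  induction assignments with
  | nil => intro st; rfl
  | cons a t ih =>
    intro st
    simp only [List.foldl_cons, pvDs, List.filterMap_cons]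
    rcases h : pvChoose labels a.1 with _ | l
    · have hb : pvStepB (pvFirstIdx labels) st a = st := by
        rw [pvStepB]
        rw [pvBest_none labels a.1 h]
      rw [hb]
      exact ih st
    · obtain ⟨j, _, hbest⟩ := pvBest_some labels a.1 l h
      have hb : pvStepB (pvFirstIdx labels) st a = pvStepD st (l, a.2) := by
        simp [pvStepB, hbest, pvStepD]
      rw [hb]
      simp only [Option.map_some, List.foldl_cons]
      exact ih _

lemma pvCntsA_getD (ds : List (String × String)) (l : String) :
    (ds.foldl pvStepA PySem.Dict.empty).getD l PySem.Dict.empty =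
      PySem.Dict.counter (pvClustersOf ds l) := by
  induction ds using List.reverseRecOn with
  | nil => rfl
  | append_singleton ds d ih =>
    obtain ⟨dl, dc⟩ := d
    rw [List.foldl_append, List.foldl_cons, List.foldl_nil]
    simp only [pvStepA]
    by_cases hdl : l = dl
    · subst hdl
      rw [PySem.Dict.getD_insert_self, PySem.Dict.getD_setdefault_self, ih]
      have hcl : pvClustersOf (ds ++ [(l, dc)]) l = pvClustersOf ds l ++ [dc] := by
        simp [pvClustersOf, List.filter_append]
      rw [hcl, PySem.Dict.counter_append_singleton]
      rfl
    · rw [PySem.Dict.getD_insert_of_ne _ _ _ hdl,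
          PySem.Dict.getD_eq_get?_getD, PySem.Dict.get?_setdefault_of_ne _ _ hdl,
          ← PySem.Dict.getD_eq_get?_getD, ih]
      have hne : (dl == l) = false := by simp [Ne.symm hdl]
      have hcl : pvClustersOf (ds ++ [(dl, dc)]) l = pvClustersOf ds l := by
        simp [pvClustersOf, List.filter_append, hne]
      rw [hcl]

lemma pvCntsA_keys (ds : List (String × String)) :
    (ds.foldl pvStepA PySem.Dict.empty).keys =
      (PySem.Set.ofList (ds.map Prod.fst) : List String) := by
  induction ds using List.reverseRecOn with
  | nil => rfl
  | append_singleton ds d ih =>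
    obtain ⟨dl, dc⟩ := d
    rw [List.foldl_append, List.foldl_cons, List.foldl_nil]
    simp only [pvStepA]
    have hc1 : ((ds.foldl pvStepA PySem.Dict.empty).setdefault dl
        PySem.Dict.empty).contains dl = true := by
      rw [PySem.Dict.contains_setdefault]
      simp
    rw [PySem.Dict.keys_insert_of_contains _ _ hc1, PySem.Dict.keys_setdefault,
        List.map_append,
        show List.map (Prod.fst : String × String → String) [(dl, dc)] = [dl] from rfl,
        PySem.Set.ofList_append_singleton]
    by_cases hm : dl ∈ ds.map Prod.fst
    · have hcon : (ds.foldl pvStepA PySem.Dict.empty).contains dl = true := by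
        rw [PySem.Dict.contains_iff_mem_keys, ih]
        exact (PySem.Set.mem_ofList _ _).mpr hm
      rw [if_pos hcon, ih, PySem.Set.add_of_mem ((PySem.Set.mem_ofList _ _).mpr hm)]
    · have hcon : ¬ (ds.foldl pvStepA PySem.Dict.empty).contains dl = true := by
        rw [PySem.Dict.contains_iff_mem_keys, ih, PySem.Set.mem_ofList]
        exact hm
      rw [if_neg hcon, ih,
          PySem.Set.add_of_not_mem (fun hc => hm ((PySem.Set.mem_ofList _ _).mp hc))]

lemma pvStB_snd (ds : List (String × String)) :
    (ds.foldl pvStepD (PySem.Dict.empty, PySem.Dict.empty)).2 = PySem.Dict.counter ds := by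
  induction ds using List.reverseRecOn with
  | nil => rfl
  | append_singleton ds d ih =>
    rw [List.foldl_append, List.foldl_cons, List.foldl_nil]
    simp only [pvStepD]
    rw [ih, PySem.Dict.counter_append_singleton]
    rfl

lemma pvMx_values (cs : List String) :
    (PySem.Dict.counter cs).values =
      (PySem.Set.ofList cs : List String).map (fun k => (cs.count k : Int)) := by
  rw [PySem.Dict.values_eq_map_keys _ (PySem.Dict.nodup_keys_counter cs) 0,
      PySem.Dict.keys_counter]
  exact List.map_congr_left (fun k _ => PySem.Dict.getD_counter cs k)

lemma pvFoldl_max_max : ∀ (l : List Int) (a b : Int),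
    l.foldl max (max a b) = max (l.foldl max a) b := by
  intro l
  induction l with
  | nil => intro a b; rfl
  | cons c t ih =>
    intro a b
    simp only [List.foldl_cons]
    rw [show max (max a b) c = max (max a c) b by omega, ih]

lemma pvMaxD_nonneg (xs : List Int) (h : ∀ v ∈ xs, (0 : Int) ≤ v) :
    (PySem.List.max? xs (fun x => x)).getD 0 = xs.foldl max 0 := by
  rcases xs with _ | ⟨x, t⟩
  · rfl
  · rw [PySem.List.max?_id_cons]
    simp only [Option.getD_some, List.foldl_cons]
    rw [max_eq_right (h x (by simp))]

lemma pvFoldlMax_map_bump (ks : List String) (g : String → Int) (x : String) :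
    ∀ acc : Int, (ks.map (fun k => g k + if k = x then 1 else 0)).foldl max acc =
      if x ∈ ks then max ((ks.map g).foldl max acc) (g x + 1)
      else (ks.map g).foldl max acc := by
  induction ks with
  | nil => intro acc; simp
  | cons k t ih =>
    intro acc
    simp only [List.map_cons, List.foldl_cons]
    by_cases hkx : k = x
    · subst hkx
      simp only [List.mem_cons, true_or, if_true]
      rw [ih]
      by_cases hxt : k ∈ t
      · rw [if_pos hxt]
        simp only [pvFoldl_max_max]
        omega
      · rw [if_neg hxt]
        simp only [pvFoldl_max_max]
        omega
    · simp only [if_neg hkx, add_zero]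
      rw [ih]
      by_cases hxt : x ∈ t
      · rw [if_pos hxt, if_pos (by simp [hxt])]
      · have hxk : ¬ x ∈ k :: t := by
          simp only [List.mem_cons]
          rintro (rfl | hc)
          · exact hkx rfl
          · exact hxt hc
        rw [if_neg hxt, if_neg hxk]

lemma pvMx_append (cs : List String) (x : String) :
    pvMx (cs ++ [x]) = max (pvMx cs) ((cs.count x : Int) + 1) := by
  have hnn : ∀ (cs' : List String), ∀ v ∈ (PySem.Dict.counter cs').values, (0 : Int) ≤ v := by
    intro cs' v hv
    rw [pvMx_values] at hv
    obtain ⟨k, -, rfl⟩ := List.mem_map.mp hv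
    exact Int.natCast_nonneg _
  rw [pvMx, pvMx, pvMaxD_nonneg _ (hnn _), pvMaxD_nonneg _ (hnn _), pvMx_values, pvMx_values]
  by_cases hx : x ∈ cs
  · have hset : (PySem.Set.ofList (cs ++ [x]) : List String) = PySem.Set.ofList cs := by
      rw [PySem.Set.ofList_append_singleton,
          PySem.Set.add_of_mem ((PySem.Set.mem_ofList _ _).mpr hx)]
    rw [hset]
    have hcnt : ∀ k ∈ (PySem.Set.ofList cs : List String),
        (((cs ++ [x]).count k : Nat) : Int) = (cs.count k : Int) + (if k = x then 1 else 0) := by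
      intro k _
      rw [List.count_append, List.count_singleton]
      by_cases hk : k = x
      · subst hk; simp
      · have hxk : (x == k) = false := by simp [Ne.symm hk]
        simp [hxk, hk]
    rw [List.map_congr_left hcnt, pvFoldlMax_map_bump]
    rw [if_pos ((PySem.Set.mem_ofList _ _).mpr hx)]
  · have hset : (PySem.Set.ofList (cs ++ [x]) : List String) =
        (PySem.Set.ofList cs : List String) ++ [x] := by
      rw [PySem.Set.ofList_append_singleton,
          PySem.Set.add_of_not_mem (fun hc => hx ((PySem.Set.mem_ofList _ _).mp hc))]
    rw [hset, List.map_append]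
    have hcnt : ∀ k ∈ (PySem.Set.ofList cs : List String),
        (((cs ++ [x]).count k : Nat) : Int) = (cs.count k : Int) := by
      intro k hk
      have hkx : k ≠ x := fun h => hx (h ▸ (PySem.Set.mem_ofList _ _).mp hk)
      have hxk : (x == k) = false := by simp [Ne.symm hkx]
      rw [List.count_append, List.count_singleton]
      simp [hxk]
    rw [List.map_congr_left hcnt, List.map_cons, List.map_nil, List.foldl_append,
        List.foldl_cons, List.foldl_nil,
        show (((cs ++ [x]).count x : Nat) : Int) = (cs.count x : Int) + 1 by
          rw [List.count_append]; simp]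

lemma pvCount_pair (ds : List (String × String)) (l cl : String) :
    (pvClustersOf ds l).count cl = ds.count (l, cl) := by
  induction ds with
  | nil => rfl
  | cons d t ih =>
    obtain ⟨a, b⟩ := d
    by_cases ha : a = l
    · subst ha
      by_cases hb : b = cl
      · subst hb
        simp [pvClustersOf] at ih ⊢
        omega
      · simp [pvClustersOf, hb] at ih ⊢
        omega
    · simp [pvClustersOf, ha] at ih ⊢
      omega

lemma pvStB_fst (ds : List (String × String)) :
    (ds.foldl pvStepD (PySem.Dict.empty, PySem.Dict.empty)).1.keys =
        (PySem.Set.ofList (ds.map Prod.fst) : List String) ∧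
      ∀ l, (ds.foldl pvStepD (PySem.Dict.empty, PySem.Dict.empty)).1.getD l 0 =
        pvMx (pvClustersOf ds l) := by
  induction ds using List.reverseRecOn with
  | nil => exact ⟨rfl, fun l => rfl⟩
  | append_singleton ds d ih =>
    obtain ⟨ihk, ihg⟩ := ih
    obtain ⟨dl, dc⟩ := d
    rw [List.foldl_append, List.foldl_cons, List.foldl_nil]
    have hcval : (ds.foldl pvStepD (PySem.Dict.empty, PySem.Dict.empty)).2.getD (dl, dc) 0
        = ((pvClustersOf ds dl).count dc : Int) := by
      rw [pvStB_snd, PySem.Dict.getD_counter, pvCount_pair]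
    simp only [pvStepD]
    constructor
    · by_cases hm : dl ∈ ds.map Prod.fst
      · have hk2 : (ds.foldl pvStepD (PySem.Dict.empty, PySem.Dict.empty)).1.contains dl
            = true := by
          rw [PySem.Dict.contains_iff_mem_keys, ihk, PySem.Set.mem_ofList]
          exact hm
        have hkeys : (if (ds.foldl pvStepD (PySem.Dict.empty, PySem.Dict.empty)).2.getD (dl, dc) 0 + 1 >
              (ds.foldl pvStepD (PySem.Dict.empty, PySem.Dict.empty)).1.getD dl 0 then
              (ds.foldl pvStepD (PySem.Dict.empty, PySem.Dict.empty)).1.insert dl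
                ((ds.foldl pvStepD (PySem.Dict.empty, PySem.Dict.empty)).2.getD (dl, dc) 0 + 1)
            else (ds.foldl pvStepD (PySem.Dict.empty, PySem.Dict.empty)).1).keys
            = (ds.foldl pvStepD (PySem.Dict.empty, PySem.Dict.empty)).1.keys := by
          split
          · exact PySem.Dict.keys_insert_of_contains _ _ hk2
          · rfl
        rw [hkeys, ihk, List.map_append,
        show List.map (Prod.fst : String × String → String) [(dl, dc)] = [dl] from rfl,
        PySem.Set.ofList_append_singleton,
            PySem.Set.add_of_mem ((PySem.Set.mem_ofList _ _).mpr hm)]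
      · have hnc : (ds.foldl pvStepD (PySem.Dict.empty, PySem.Dict.empty)).1.contains dl
            = false := by
          rw [← Bool.not_eq_true, PySem.Dict.contains_iff_mem_keys, ihk, PySem.Set.mem_ofList]
          exact hm
        have hz : (ds.foldl pvStepD (PySem.Dict.empty, PySem.Dict.empty)).1.getD dl 0 = 0 :=
          PySem.Dict.getD_of_not_contains _ _ hnc
        have hpos : (ds.foldl pvStepD (PySem.Dict.empty, PySem.Dict.empty)).2.getD (dl, dc) 0 + 1 >
            (ds.foldl pvStepD (PySem.Dict.empty, PySem.Dict.empty)).1.getD dl 0 := by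
          rw [hz, hcval]
          omega
        rw [if_pos hpos, PySem.Dict.keys_insert_of_not_contains _ _ hnc, ihk,
            List.map_append,
        show List.map (Prod.fst : String × String → String) [(dl, dc)] = [dl] from rfl,
        PySem.Set.ofList_append_singleton,
            PySem.Set.add_of_not_mem (fun hc => hm ((PySem.Set.mem_ofList _ _).mp hc))]
    · intro l
      by_cases hdl : l = dl
      · subst hdl
        have hcl : pvClustersOf (ds ++ [(l, dc)]) l = pvClustersOf ds l ++ [dc] := by
          simp [pvClustersOf, List.filter_append]
        rw [hcl, pvMx_append]
        have hold := ihg l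
        by_cases hgt : (ds.foldl pvStepD (PySem.Dict.empty, PySem.Dict.empty)).2.getD (l, dc) 0 + 1 >
            (ds.foldl pvStepD (PySem.Dict.empty, PySem.Dict.empty)).1.getD l 0
        · rw [if_pos hgt, PySem.Dict.getD_insert_self]
          omega
        · rw [if_neg hgt]
          omega
      · have hne : (dl == l) = false := by simp [Ne.symm hdl]
        have hcl : pvClustersOf (ds ++ [(dl, dc)]) l = pvClustersOf ds l := by
          simp [pvClustersOf, List.filter_append, hne]
        rw [hcl]
        have hgetD : (if (ds.foldl pvStepD (PySem.Dict.empty, PySem.Dict.empty)).2.getD (dl, dc) 0 + 1 >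
              (ds.foldl pvStepD (PySem.Dict.empty, PySem.Dict.empty)).1.getD dl 0 then
              (ds.foldl pvStepD (PySem.Dict.empty, PySem.Dict.empty)).1.insert dl
                ((ds.foldl pvStepD (PySem.Dict.empty, PySem.Dict.empty)).2.getD (dl, dc) 0 + 1)
            else (ds.foldl pvStepD (PySem.Dict.empty, PySem.Dict.empty)).1).getD l 0
            = (ds.foldl pvStepD (PySem.Dict.empty, PySem.Dict.empty)).1.getD l 0 := by
          split
          · exact PySem.Dict.getD_insert_of_ne _ _ _ hdl
          · rfl
        rw [hgetD]
        exact ihg l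

-- ===== VERDICT (by name: the statement is the Claim_ definition above) =====
theorem count_predicted_labels_spec : Claim_equal_count_predicted_labels := by
  unfold Claim_equal_count_predicted_labels
  intro assignments labels _
  unfold Spec_count_predicted_labels
  simp only [count_predicted_labels, count_predicted_labels_alt]
  rw [pvFoldA_eq, pvFoldB_eq]
  obtain ⟨hk, hg⟩ := pvStB_fst (pvDs assignments labels)
  have hnodA : ((pvDs assignments labels).foldl pvStepA PySem.Dict.empty).keys.Nodup := by
    rw [pvCntsA_keys]
    exact PySem.Set.nodup_ofList _
  have hnodB : ((pvDs assignments labels).foldl pvStepD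
      (PySem.Dict.empty, PySem.Dict.empty)).1.keys.Nodup := by
    rw [hk]
    exact PySem.Set.nodup_ofList _
  rw [PySem.Dict.items_eq_map_keys _ hnodA PySem.Dict.empty,
      PySem.Dict.items_eq_map_keys _ hnodB 0, List.map_map,
      pvCntsA_keys, hk]
  apply List.map_congr_left
  intro k _
  simp only [Function.comp_apply]
  rw [pvCntsA_getD, hg k]
  rfl
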